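-- pv_equiv track=rewrite | github.com/jrossgit/adventofcode2020 | src/day16.py | errors_in_ticket
-- ===== SOURCE A (Python) =====
-- from typing import Dict, List, Tuple
--
-- def errors_in_ticket(ranges: Dict, ticket: List[int]) -> List[int]:
--     errors = []
--     for field in ticket:
--         found_range = False
--         for rng in ranges.values():
--             if (rng[0][0] <= field <= rng[0][1]) or (rng[1][0] <= field <= rng[1][1]):
--                 found_range = True
--                 break
--         if not found_range:
--             errors.append(field)
--     return errors
-- ===== SOURCE B (Python) =====
-- def errors_in_ticket(ranges, ticket):
--     # Collect the two intervals of every field rule, sort by lower bound,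
--     # merge overlapping intervals once, then test each ticket field against
--     # the (usually much shorter) merged interval list.
--     ivs = []
--     for rng in ranges.values():
--         ivs.append((rng[0][0], rng[0][1]))
--         ivs.append((rng[1][0], rng[1][1]))
--     ivs.sort(key=lambda iv: iv[0])
--     merged = []
--     for lo, hi in ivs:
--         if merged and lo <= merged[-1][1]:
--             if merged[-1][1] < hi:
--                 merged[-1] = (merged[-1][0], hi)
--         else:
--             merged.append((lo, hi))
--     return [f for f in ticket if not any(lo <= f <= hi for lo, hi in merged)]
-- ===== Notes on version B (the rewrite author's own statement) =====
-- stated objective: alternative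
-- what changed: Instead of scanning every rule's two ranges per ticket field, B collects all (lo,hi) intervals once, sorts them by lower bound and merges overlapping ones in one pass, then tests each field against the merged interval list.
-- outside the precondition, e.g. on errors_in_ticket({'a': [[107]]}, []): A returns [], B raises IndexError; on errors_in_ticket({'a': [[5, 9], [1]]}, [6]): A returns [], B raises IndexError
import Mathlib
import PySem

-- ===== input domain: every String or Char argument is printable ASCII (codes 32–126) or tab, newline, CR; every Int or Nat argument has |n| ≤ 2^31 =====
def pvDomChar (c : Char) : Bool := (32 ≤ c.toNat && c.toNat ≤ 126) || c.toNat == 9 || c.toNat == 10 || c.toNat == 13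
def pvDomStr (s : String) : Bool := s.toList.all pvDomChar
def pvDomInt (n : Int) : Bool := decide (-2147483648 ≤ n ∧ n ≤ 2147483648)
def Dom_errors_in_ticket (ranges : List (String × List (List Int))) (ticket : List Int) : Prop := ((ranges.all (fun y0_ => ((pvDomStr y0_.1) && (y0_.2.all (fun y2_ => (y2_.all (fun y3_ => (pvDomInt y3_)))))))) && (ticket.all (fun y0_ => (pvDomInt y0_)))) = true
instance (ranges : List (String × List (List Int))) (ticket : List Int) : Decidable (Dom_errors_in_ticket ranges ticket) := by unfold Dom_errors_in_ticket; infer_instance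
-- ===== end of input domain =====

-- B replaces A's per-field scan over all range pairs by one sort-and-merge of the
-- intervals followed by a membership test against the merged list (objective: alternative).


-- ===== PORT A =====
-- rng[0][0] <= field <= rng[0][1]  (arbitrary 'false' outside Pre_, where Python raises IndexError)
def pvCov2 (iv : List Int) (f : Int) : Bool :=
  match iv with
  | lo :: hi :: _ => decide (lo ≤ f) && decide (f ≤ hi)
  | _ => false

-- the inner 'if' of A's range loop
def pvRngMatch (rng : List (List Int)) (f : Int) : Bool :=
  match rng with
  | a :: b :: _ => pvCov2 a f || pvCov2 b f
  | _ => false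

def errors_in_ticket (ranges : List (String × List (List Int))) (ticket : List Int) : List Int :=
  ticket.foldl (fun errors field =>
    let found_range := (PySem.Dict.ofList ranges).values.any (fun rng => pvRngMatch rng field)
    if !found_range then errors ++ [field] else errors) []

-- ===== PORT B =====
-- the two (lo, hi) tuples appended for one rule ([] outside Pre_, where Python raises)
def pvTwoIvs (rng : List (List Int)) : List (Int × Int) :=
  match rng with
  | (l0 :: h0 :: _) :: (l1 :: h1 :: _) :: _ => [(l0, h0), (l1, h1)]
  | _ => []

-- one iteration of Source B's merge loop
def pvMergeStep (merged : List (Int × Int)) (iv : Int × Int) : List (Int × Int) :=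
  match merged.getLast? with
  | some (mlo, mhi) =>
      if iv.1 ≤ mhi then
        if mhi < iv.2 then merged.dropLast ++ [(mlo, iv.2)] else merged
      else merged ++ [iv]
  | none => [iv]

def errors_in_ticket_alt (ranges : List (String × List (List Int))) (ticket : List Int) : List Int :=
  let ivs := (PySem.Dict.ofList ranges).values.foldl (fun acc rng => acc ++ pvTwoIvs rng) []
  let sortedIvs := PySem.List.sorted ivs (fun iv => iv.1) false
  let merged := sortedIvs.foldl pvMergeStep []
  ticket.filter (fun f => !(merged.any (fun iv => decide (iv.1 ≤ f) && decide (f ≤ iv.2))))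

-- ===== PRECONDITION & SPEC =====
-- Pre_ excludes malformed rules (fewer than two intervals, or a first/second interval with
-- fewer than two endpoints): B always indexes both endpoints and raises IndexError there,
-- while A's short-circuiting chained comparisons can skip the bad index and return a value.
def Pre_errors_in_ticket (ranges : List (String × List (List Int))) (ticket : List Int) : Prop :=
  ∀ rng ∈ (PySem.Dict.ofList ranges).values,
    2 ≤ rng.length ∧ 2 ≤ (rng.getD 0 []).length ∧ 2 ≤ (rng.getD 1 []).length
instance (ranges : List (String × List (List Int))) (ticket : List Int) : Decidable (Pre_errors_in_ticket ranges ticket) := by unfold Pre_errors_in_ticket; infer_instance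

def pvWitness_errors_in_ticket : (List (String × List (List Int))) × List Int :=
  ([("row", [[1, 3], [5, 7]]), ("col", [[6, 11], [33, 44]])], [7, 4, 50])

def Spec_errors_in_ticket (ranges : List (String × List (List Int))) (ticket : List Int) (out : List Int) : Prop := out = errors_in_ticket_alt ranges ticket
instance (ranges : List (String × List (List Int))) (ticket : List Int) (out : List Int) : Decidable (Spec_errors_in_ticket ranges ticket out) := by unfold Spec_errors_in_ticket; infer_instance

-- ===== CLAIM (what is proved, stated in full; the proofs are below) =====
def Claim_equal_errors_in_ticket : Prop := ∀ (ranges : List (String × List (List Int))) (ticket : List Int), Dom_errors_in_ticket ranges ticket → Pre_errors_in_ticket ranges ticket → Spec_errors_in_ticket ranges ticket (errors_in_ticket ranges ticket)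

-- ===== LEMMAS AND PROOFS =====

-- "field f is covered by some interval of l"
def pvCovers (l : List (Int × Int)) (f : Int) : Bool :=
  l.any (fun iv => decide (iv.1 ≤ f) && decide (f ≤ iv.2))

lemma pvCovers_append (l t : List (Int × Int)) (f : Int) :
    pvCovers (l ++ t) f = (pvCovers l f || pvCovers t f) := List.any_append

-- coverage by the interval list equals A's per-rule match, given the rule shapes
lemma pvMatch_eq_covers (vals : List (List (List Int))) (f : Int)
    (h : ∀ rng ∈ vals, 2 ≤ rng.length ∧ 2 ≤ (rng.getD 0 []).length ∧ 2 ≤ (rng.getD 1 []).length) :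
    vals.any (fun rng => pvRngMatch rng f)
      = pvCovers (vals.foldl (fun acc rng => acc ++ pvTwoIvs rng) []) f := by
  rw [PySem.List.foldl_append_eq_flatMap, List.nil_append]
  unfold pvCovers
  rw [List.any_flatMap]
  apply PySem.List.any_congr_mem
  intro rng hr
  obtain ⟨h1, h2, h3⟩ := h rng hr
  match rng with
  | (l0 :: h0 :: _) :: (l1 :: h1 :: _) :: _ =>
      simp [pvRngMatch, pvCov2, pvTwoIvs]
  | [] => simp at h1
  | [_] => simp at h1
  | ([] :: _ :: _) => simp at h2
  | ([_] :: _ :: _) => simp at h2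
  | ((_ :: _ :: _) :: [] :: _) => simp at h3
  | ((_ :: _ :: _) :: [_] :: _) => simp at h3

-- the merge loop preserves pointwise coverage, provided the input is sorted by lower
-- bound and every remaining lower bound is ≥ the last accumulated lower bound
lemma pvMerge_covers (f : Int) :
    ∀ (l : List (Int × Int)) (acc : List (Int × Int)),
      l.Pairwise (fun a b => a.1 ≤ b.1) →
      (∀ iv ∈ l, ∀ mlast ∈ acc.getLast?, mlast.1 ≤ iv.1) →
      pvCovers (l.foldl pvMergeStep acc) f = (pvCovers acc f || pvCovers l f) := by
  intro l
  induction l with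
  | nil => intro acc _ _; simp [pvCovers]
  | cons iv rest ih =>
      intro acc hpw hlast
      have hpw' := (List.pairwise_cons.mp hpw).2
      have hhead := (List.pairwise_cons.mp hpw).1
      rw [List.foldl_cons]
      have hstep : pvCovers (pvMergeStep acc iv) f = (pvCovers acc f || pvCovers [iv] f)
          ∧ (∀ jv ∈ rest, ∀ mlast ∈ (pvMergeStep acc iv).getLast?, mlast.1 ≤ jv.1) := by
        unfold pvMergeStep
        match hl : acc.getLast? with
        | none =>
            have : acc = [] := List.getLast?_eq_none_iff.mp hl
            subst this
            constructor
            · simp [pvCovers]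
            · intro jv hjv mlast hm
              simp at hm
              subst hm
              exact hhead jv hjv
        | some (mlo, mhi) =>
            have hmem : (mlo, mhi) ∈ acc := List.mem_of_getLast? hl
            have hmlo : mlo ≤ iv.1 := hlast iv (by simp) (mlo, mhi) (by simp [hl])
            have hacc : acc.dropLast ++ [(mlo, mhi)] = acc := List.dropLast_append_getLast? _ hl
            by_cases h1 : iv.1 ≤ mhi
            · by_cases h2 : mhi < iv.2
              · simp only [h1, h2, if_true]
                constructor
                · conv_rhs => rw [← hacc]
                  rw [pvCovers_append, pvCovers_append, Bool.or_assoc]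
                  congr 1
                  simp only [pvCovers, List.any_cons, List.any_nil, Bool.or_false]
                  have hbool : ∀ a b : Bool, (a = true ↔ b = true) → a = b := by decide
                  apply hbool
                  simp only [Bool.and_eq_true, Bool.or_eq_true, decide_eq_true_eq]
                  omega
                · intro jv hjv mlast hm
                  rw [List.getLast?_append] at hm
                  simp at hm
                  subst hm
                  exact le_trans hmlo (hhead jv hjv)
              · simp only [h1, h2, if_true, if_false]
                constructor
                · simp only [pvCovers, List.any_cons, List.any_nil, Bool.or_false]
                  cases hiv : (decide (iv.1 ≤ f) && decide (f ≤ iv.2))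
                  · simp
                  · simp only [Bool.or_true]
                    rw [List.any_eq_true]
                    refine ⟨(mlo, mhi), hmem, ?_⟩
                    simp only [Bool.and_eq_true, decide_eq_true_eq] at hiv ⊢
                    omega
                · intro jv hjv mlast hm
                  rw [hl] at hm
                  simp at hm
                  subst hm
                  exact le_trans hmlo (hhead jv hjv)
            · simp only [h1, if_false]
              constructor
              · exact pvCovers_append _ _ _
              · intro jv hjv mlast hm
                rw [List.getLast?_append] at hm
                simp at hm
                subst hm
                exact hhead jv hjv
      rw [ih _ hpw' hstep.2, hstep.1]
      simp only [pvCovers, List.any_cons, List.any_nil, Bool.or_false]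
      cases pvCovers acc f <;> cases (decide (iv.1 ≤ f) && decide (f ≤ iv.2)) <;> simp

-- per-field agreement of the two programs' tests
lemma pvField_eq (ranges : List (String × List (List Int))) (f : Int)
    (hpre : Pre_errors_in_ticket ranges []) :
    (PySem.Dict.ofList ranges).values.any (fun rng => pvRngMatch rng f)
      = pvCovers ((PySem.List.sorted
            ((PySem.Dict.ofList ranges).values.foldl (fun acc rng => acc ++ pvTwoIvs rng) [])
            (fun iv => iv.1) false).foldl pvMergeStep []) f := by
  rw [pvMatch_eq_covers _ _ hpre]
  rw [pvMerge_covers f _ [] (PySem.List.sorted_pairwise _ _) (by simp)]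
  simp only [pvCovers]
  exact (List.Perm.any_eq (PySem.List.sorted_perm _ _ _)).symm

-- ===== VERDICT (by name: the statement is the Claim_ definition above) =====
theorem errors_in_ticket_spec : Claim_equal_errors_in_ticket := by
  intro ranges ticket _ hpre
  unfold Spec_errors_in_ticket errors_in_ticket errors_in_ticket_alt
  dsimp only
  rw [PySem.List.foldl_append_if_eq_filter, List.nil_append]
  apply List.filter_congr
  intro f _
  rw [pvField_eq ranges f hpre]
  rfl
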